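-- pv_equiv track=rewrite | github.com/3DGI/urban-morphology-3d | cityStats.py | boundingbox_volume
-- ===== SOURCE A (Python) =====
-- def boundingbox_volume(points):
--     """Returns the volume of the bounding box"""
--
--     minx = min(p[0] for p in points)
--     maxx = max(p[0] for p in points)
--     miny = min(p[1] for p in points)
--     maxy = max(p[1] for p in points)
--     minz = min(p[2] for p in points)
--     maxz = max(p[2] for p in points)
--
--     return (maxx - minx) * (maxy - miny) * (maxz - minz)
-- ===== SOURCE B (Python) =====
-- def boundingbox_volume(points):
--     """Returns the volume of the bounding box (single pass over the points)"""
--     it = iter(points)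
--     try:
--         x, y, z = next(it)
--     except StopIteration:
--         raise ValueError("min() arg is an empty sequence")
--     minx = maxx = x
--     miny = maxy = y
--     minz = maxz = z
--     for x, y, z in it:
--         if x < minx:
--             minx = x
--         if x > maxx:
--             maxx = x
--         if y < miny:
--             miny = y
--         if y > maxy:
--             maxy = y
--         if z < minz:
--             minz = z
--         if z > maxz:
--             maxz = z
--     return (maxx - minx) * (maxy - miny) * (maxz - minz)
-- ===== Notes on version B (the rewrite author's own statement) =====
-- stated objective: faster
-- what changed: Six separate min()/max() generator passes are replaced by one single pass that maintains the six extrema in local variables.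
import Mathlib
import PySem

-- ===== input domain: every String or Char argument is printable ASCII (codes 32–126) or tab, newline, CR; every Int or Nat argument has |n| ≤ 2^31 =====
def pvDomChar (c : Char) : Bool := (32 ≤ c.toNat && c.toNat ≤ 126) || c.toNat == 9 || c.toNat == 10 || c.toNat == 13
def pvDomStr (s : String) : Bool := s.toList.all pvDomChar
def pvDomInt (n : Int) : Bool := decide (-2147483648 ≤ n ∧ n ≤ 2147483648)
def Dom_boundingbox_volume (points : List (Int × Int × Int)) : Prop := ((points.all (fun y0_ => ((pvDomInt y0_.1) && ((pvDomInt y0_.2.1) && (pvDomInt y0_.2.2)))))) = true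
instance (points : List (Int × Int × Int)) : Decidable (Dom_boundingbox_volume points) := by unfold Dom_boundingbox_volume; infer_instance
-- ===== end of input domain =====

-- B replaces A's six min()/max() generator passes by one single pass maintaining the six extrema (constant-factor speedup).

-- ===== PORT A =====
-- Python min/max over a nonempty list: fold from the head ([] is excluded by Pre_, value 0 is unreachable).
def pyMinList (xs : List Int) : Int :=
  match xs with
  | [] => 0
  | h :: t => t.foldl min h

def pyMaxList (xs : List Int) : Int :=
  match xs with
  | [] => 0
  | h :: t => t.foldl max h

def boundingbox_volume (points : List (Int × Int × Int)) : Int :=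
  let minx := pyMinList (points.map (fun p => p.1))
  let maxx := pyMaxList (points.map (fun p => p.1))
  let miny := pyMinList (points.map (fun p => p.2.1))
  let maxy := pyMaxList (points.map (fun p => p.2.1))
  let minz := pyMinList (points.map (fun p => p.2.2))
  let maxz := pyMaxList (points.map (fun p => p.2.2))
  (maxx - minx) * (maxy - miny) * (maxz - minz)

-- ===== PORT B =====
-- one loop body: update the six extrema with comparisons, as in Source B
def bbStep (st : Int × Int × Int × Int × Int × Int) (p : Int × Int × Int) :
    Int × Int × Int × Int × Int × Int :=
  match st, p with
  | (minx, maxx, miny, maxy, minz, maxz), (x, y, z) =>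
    (if x < minx then x else minx,
     if maxx < x then x else maxx,
     if y < miny then y else miny,
     if maxy < y then y else maxy,
     if z < minz then z else minz,
     if maxz < z then z else maxz)

def boundingbox_volume_alt (points : List (Int × Int × Int)) : Int :=
  match points with
  | [] => 0   -- Source B raises ValueError here; excluded by Pre_
  | (x, y, z) :: t =>
    match t.foldl bbStep (x, x, y, y, z, z) with
    | (minx, maxx, miny, maxy, minz, maxz) =>
      (maxx - minx) * (maxy - miny) * (maxz - minz)

-- ===== PRECONDITION & SPEC =====
-- Pre_ excludes only the empty list, on which A's min() raises ValueError.
def Pre_boundingbox_volume (points : List (Int × Int × Int)) : Prop := points.isEmpty = false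
instance (points : List (Int × Int × Int)) : Decidable (Pre_boundingbox_volume points) := by unfold Pre_boundingbox_volume; infer_instance
def pvWitness_boundingbox_volume : (List (Int × Int × Int)) := [(0, 1, 2), (3, -1, 5)]

def Spec_boundingbox_volume (points : List (Int × Int × Int)) (out : Int) : Prop := out = boundingbox_volume_alt points
instance (points : List (Int × Int × Int)) (out : Int) : Decidable (Spec_boundingbox_volume points out) := by unfold Spec_boundingbox_volume; infer_instance

-- ===== CLAIM (what is proved, stated in full; the proofs are below) =====
def Claim_equal_boundingbox_volume : Prop := ∀ (points : List (Int × Int × Int)), Dom_boundingbox_volume points → Pre_boundingbox_volume points → Spec_boundingbox_volume points (boundingbox_volume points)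

-- ===== LEMMAS AND PROOFS =====

theorem if_lt_eq_min (a x : Int) : (if x < a then x else a) = min a x := by
  rw [min_def]; split_ifs <;> omega

theorem if_gt_eq_max (a x : Int) : (if a < x then x else a) = max a x := by
  rw [max_def]; split_ifs <;> omega

-- the fused fold computes the six independent folds
theorem foldl_bbStep (t : List (Int × Int × Int))
    (a b c d e f : Int) :
    t.foldl bbStep (a, b, c, d, e, f) =
      (t.foldl (fun m p => min m p.1) a,
       t.foldl (fun m p => max m p.1) b,
       t.foldl (fun m p => min m p.2.1) c,
       t.foldl (fun m p => max m p.2.1) d,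
       t.foldl (fun m p => min m p.2.2) e,
       t.foldl (fun m p => max m p.2.2) f) := by
  induction t generalizing a b c d e f with
  | nil => rfl
  | cons p t ih =>
    obtain ⟨x, y, z⟩ := p
    simp only [List.foldl_cons, bbStep, if_lt_eq_min, if_gt_eq_max]
    exact ih _ _ _ _ _ _

-- ===== VERDICT (by name: the statement is the Claim_ definition above) =====
theorem boundingbox_volume_spec : Claim_equal_boundingbox_volume := by
  intro points _ hpre
  match points with
  | [] => simp [Pre_boundingbox_volume] at hpre
  | (x, y, z) :: t =>
    unfold Spec_boundingbox_volume boundingbox_volume boundingbox_volume_alt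
    simp only [List.map_cons, pyMinList, pyMaxList, foldl_bbStep, List.foldl_map]
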